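-- pv_equiv track=rewrite | github.com/lastdreamer7591/L1SDN-FP-TD5 | L1SDN_FP_TD5.py | shaker_2021_exo_2
-- ===== SOURCE A (Python) =====
-- def shaker_2021_exo_2(TF, TP, TA, livres):
--     """Test si le jury aura le temps de lire tous les livres de leur catégorie
--     :param TF: (int) Temps pour le jury Fantastique
--     :param TP: (int) Temps pour le jury Policier
--     :param TA: (int) Temps pour le jury Autre
--     :param livre: (list) Liste des livres
--     :return: (bool) True si le jury a le temps de lire tous les livres, False sinon"""
--     for livre in livres:
--         if livre[0] == "F":
--             TF -= livre[1]
--             if TF < 0: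
--                 return False
--         elif livre[0] == "P":
--             TP -= livre[1]
--             if TP < 0:
--                 return False
--         else:
--             TA -= livre[1]
--             if TA < 0:
--                 return False
--     return True
-- ===== SOURCE B (Python) =====
-- def shaker_2021_exo_2(TF, TP, TA, livres):
--     def fits(budget, pred):
--         for cat, t in livres:
--             if pred(cat):
--                 budget -= t
--                 if budget < 0:
--                     return False
--         return True
--     return (fits(TF, lambda c: c == "F")
--             and fits(TP, lambda c: c == "P")
--             and fits(TA, lambda c: c != "F" and c != "P"))
-- ===== Notes on version B (the rewrite author's own statement) =====
-- stated objective: alternative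
-- what changed: Instead of one interleaved loop dispatching on category with three mutable budgets, B runs one generic per-category pass (a single helper taking a budget and a predicate) three times over the list, one pass per jury, keeping the running cumulative subtraction so mid-sequence dips on negative times are preserved.
import Mathlib
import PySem

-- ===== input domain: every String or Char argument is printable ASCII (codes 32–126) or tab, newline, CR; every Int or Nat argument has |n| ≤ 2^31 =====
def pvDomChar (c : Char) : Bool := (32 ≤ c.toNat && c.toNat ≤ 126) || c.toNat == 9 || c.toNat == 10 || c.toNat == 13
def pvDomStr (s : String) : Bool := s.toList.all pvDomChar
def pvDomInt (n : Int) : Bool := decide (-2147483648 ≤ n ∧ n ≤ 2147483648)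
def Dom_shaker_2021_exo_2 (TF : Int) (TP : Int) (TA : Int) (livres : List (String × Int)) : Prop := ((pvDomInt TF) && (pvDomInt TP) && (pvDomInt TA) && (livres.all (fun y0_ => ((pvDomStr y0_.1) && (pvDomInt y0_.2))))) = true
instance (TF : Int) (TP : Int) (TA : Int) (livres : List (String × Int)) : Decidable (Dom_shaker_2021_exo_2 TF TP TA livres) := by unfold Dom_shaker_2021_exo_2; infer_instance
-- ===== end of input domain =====

-- B replaces A's single interleaved loop (three mutable budgets, dispatch per book) by one
-- generic per-category pass run three times, one pass per jury (objective: alternative decomposition).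

-- ===== PORT A =====
-- A's single loop over livres, carrying the three budgets as state.
def shaker_2021_exo_2 (TF : Int) (TP : Int) (TA : Int) (livres : List (String × Int)) : Bool :=
  match livres with
  | [] => true
  | (c, t) :: rest =>
    if c == "F" then
      if TF - t < 0 then false else shaker_2021_exo_2 (TF - t) TP TA rest
    else if c == "P" then
      if TP - t < 0 then false else shaker_2021_exo_2 TF (TP - t) TA rest
    else
      if TA - t < 0 then false else shaker_2021_exo_2 TF TP (TA - t) rest

-- ===== PORT B =====
-- B's helper: one pass over livres for the books selected by pred, running budget subtraction.
def pvFits (pred : String → Bool) (budget : Int) (livres : List (String × Int)) : Bool :=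
  match livres with
  | [] => true
  | (c, t) :: rest =>
    if pred c then
      if budget - t < 0 then false else pvFits pred (budget - t) rest
    else pvFits pred budget rest

def shaker_2021_exo_2_alt (TF : Int) (TP : Int) (TA : Int) (livres : List (String × Int)) : Bool :=
  pvFits (fun c => c == "F") TF livres
    && pvFits (fun c => c == "P") TP livres
    && pvFits (fun c => !(c == "F") && !(c == "P")) TA livres

-- ===== PRECONDITION & SPEC =====
def Spec_shaker_2021_exo_2 (TF : Int) (TP : Int) (TA : Int) (livres : List (String × Int)) (out : Bool) : Prop := out = shaker_2021_exo_2_alt TF TP TA livres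
instance (TF : Int) (TP : Int) (TA : Int) (livres : List (String × Int)) (out : Bool) : Decidable (Spec_shaker_2021_exo_2 TF TP TA livres out) := by unfold Spec_shaker_2021_exo_2; infer_instance

-- ===== CLAIM (what is proved, stated in full; the proofs are below) =====
def Claim_equal_shaker_2021_exo_2 : Prop := ∀ (TF : Int) (TP : Int) (TA : Int) (livres : List (String × Int)), Dom_shaker_2021_exo_2 TF TP TA livres → Spec_shaker_2021_exo_2 TF TP TA livres (shaker_2021_exo_2 TF TP TA livres)

-- ===== LEMMAS AND PROOFS =====
theorem shaker_eq_alt (livres : List (String × Int)) :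
    ∀ (TF TP TA : Int), shaker_2021_exo_2 TF TP TA livres = shaker_2021_exo_2_alt TF TP TA livres := by
  induction livres with
  | nil => intro TF TP TA; simp [shaker_2021_exo_2, shaker_2021_exo_2_alt, pvFits]
  | cons hd rest ih =>
    intro TF TP TA
    obtain ⟨c, t⟩ := hd
    by_cases hF : c = "F"
    · subst hF
      by_cases h : TF - t < 0 <;>
        simp [shaker_2021_exo_2, shaker_2021_exo_2_alt, pvFits, h, ih]
    · by_cases hP : c = "P"
      · subst hP
        by_cases h : TP - t < 0 <;>
          simp [shaker_2021_exo_2, shaker_2021_exo_2_alt, pvFits, h, ih]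
      · by_cases h : TA - t < 0 <;>
          simp [shaker_2021_exo_2, shaker_2021_exo_2_alt, pvFits, hF, hP, h, ih]

-- ===== VERDICT (by name: the statement is the Claim_ definition above) =====
theorem shaker_2021_exo_2_spec : Claim_equal_shaker_2021_exo_2 := by
  intro TF TP TA livres _
  exact shaker_eq_alt livres TF TP TA
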